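-- pv_equiv track=rewrite | github.com/Shenia/daily_byte_exercises | 29_coloring.py | coloring
-- ===== SOURCE A (Python) =====
-- def coloring(graph):
--     vertices = []
--     if len(graph) == 0:
--         return true
--     group_1_taken = False
--     group_2_taken = False
--     group_1 = []
--     group_2 = []
--     for i in range(0, len(graph)):
--         vertices.append(i)
--
--     for i, neighbors_i in enumerate(graph):
--         # neighbors with itself
--         if i in neighbors_i:
--             return False
--         # invalid vertice
--         for neighbor in neighbors_i:
--             if neighbor not in vertices:
--                 return False
--         # set groups
--         if not group_1_taken:
--             group_1.extend(neighbors_i)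
--             group_1_taken = True
--         elif equal_set(group_1, neighbors_i):
--             continue
--         elif not group_2_taken:
--             group_2.extend(neighbors_i)
--             group_2_taken = True
--         elif not equal_set(group_2, neighbors_i):
--             return False
--     group_1.extend(group_2)
--     if not equal_set(group_1, vertices):
--         return False
--     return True
--
-- def equal_set(list_1, list_2):
--     for item in list_1:
--         if not item in list_2:
--             return False
--     for item in list_2:
--         if not item in list_1:
--             return False
--     return True
-- ===== SOURCE B (Python) =====
-- def coloring(graph):
--     if len(graph) == 0:
--         return true
--     n = len(graph)
--     # canonical key of each vertex's neighborhood: the sorted tuple of its distinct neighbors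
--     keys = [tuple(sorted(set(nbrs))) for nbrs in graph]
--     if any(i in graph[i] for i in range(n)):
--         return False
--     # at most two distinct keys: every key differing from keys[0] must equal the first such key
--     rest = [k for k in keys if k != keys[0]]
--     if any(k != rest[0] for k in rest):
--         return False
--     # the neighborhoods together must cover exactly the vertex set
--     # (this also rejects any out-of-range neighbor, so no separate range check is needed)
--     return sorted({v for nbrs in graph for v in nbrs}) == list(range(n))
-- ===== Notes on version B (the rewrite author's own statement) =====
-- stated objective: alternative
-- what changed: Replaces A's incremental group_1/group_2 taken-flag machinery and per-vertex equal_set/range scans by canonicalization: each neighborhood becomes a sorted distinct tuple, the at-most-two-groups test becomes 'all keys differing from keys[0] are equal to the first such key', the explicit out-of-range check disappears (subsumed by the final comparison), and the union test becomes comparing the sorted union of all neighbor lists with list(range(n)).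
import Mathlib
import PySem

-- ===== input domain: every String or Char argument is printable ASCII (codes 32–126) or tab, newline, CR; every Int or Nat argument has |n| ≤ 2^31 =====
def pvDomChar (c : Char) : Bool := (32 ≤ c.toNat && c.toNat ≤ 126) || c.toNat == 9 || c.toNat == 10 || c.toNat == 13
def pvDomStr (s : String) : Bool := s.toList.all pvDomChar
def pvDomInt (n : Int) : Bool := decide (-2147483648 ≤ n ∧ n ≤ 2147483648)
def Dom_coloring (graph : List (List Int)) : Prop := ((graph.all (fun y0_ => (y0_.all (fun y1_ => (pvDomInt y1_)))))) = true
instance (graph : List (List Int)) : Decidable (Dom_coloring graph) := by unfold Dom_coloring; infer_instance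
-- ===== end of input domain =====

-- B drops A's group_1/group_2 flag machinery and explicit range check: it canonicalizes every
-- neighborhood to a sorted distinct tuple, requires all keys differing from keys[0] to be equal,
-- and compares the sorted union of all neighbor lists with list(range(n)) (objective: simpler).

-- ===== PORT A =====
-- helper equal_set of A
def equalSet (l1 l2 : List Int) : Bool :=
  l1.all (fun x => l2.contains x) && l2.all (fun x => l1.contains x)

-- the 'for i, neighbors_i in enumerate(graph)' loop of A, with its early returns;
-- the [] case is A's code after the loop: group_1.extend(group_2); return equal_set(group_1, vertices)
def coloringLoop (vertices : List Int) (items : List (Int × List Int))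
    (g1t g2t : Bool) (g1 g2 : List Int) : Bool :=
  match items with
  | [] => equalSet (g1 ++ g2) vertices
  | (i, nbrs) :: rest =>
      if nbrs.contains i then false
      else if nbrs.any (fun v => !(vertices.contains v)) then false
      else if !g1t then coloringLoop vertices rest true g2t (g1 ++ nbrs) g2
      else if equalSet g1 nbrs then coloringLoop vertices rest g1t g2t g1 g2
      else if !g2t then coloringLoop vertices rest g1t true g1 (g2 ++ nbrs)
      else if !(equalSet g2 nbrs) then false
      else coloringLoop vertices rest g1t g2t g1 g2

def coloring (graph : List (List Int)) : Bool :=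
  if graph.length == 0 then
    true   -- Python A raises NameError here (the unbound name 'true'); excluded by Pre_coloring
  else
    coloringLoop ((PySem.List.pyRange 0 graph.length 1).foldl (fun acc i => acc ++ [i]) [])
      (PySem.List.enumerate graph 0) false false [] []

-- ===== PORT B =====
-- 'tuple(sorted(set(nbrs)))': the canonical key of a neighborhood
def canon (nbrs : List Int) : List Int :=
  PySem.List.sorted (PySem.Set.ofList nbrs) (fun x => x)

def coloring_alt (graph : List (List Int)) : Bool :=
  if graph.length == 0 then
    true   -- Python B raises NameError here too (same unbound name 'true'); excluded by Pre_coloring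
  else
    let n : Int := graph.length
    let keys := graph.map canon
    if (PySem.List.pyRange 0 n 1).any (fun i => (PySem.List.pyGetD graph i []).contains i) then
      false
    else
      let rest := keys.filter (fun k => !(k == PySem.List.pyGetD keys 0 []))
      if rest.any (fun k => !(k == PySem.List.pyGetD rest 0 [])) then
        false
      else
        PySem.List.sorted (PySem.Set.ofList graph.flatten) (fun x => x) == PySem.List.pyRange 0 n 1

-- ===== PRECONDITION & SPEC =====
-- Pre_ excludes only the empty graph, on which A raises NameError (the undefined name 'true').
def Pre_coloring (graph : List (List Int)) : Prop := graph ≠ []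
instance (graph : List (List Int)) : Decidable (Pre_coloring graph) := by unfold Pre_coloring; infer_instance
def pvWitness_coloring : List (List Int) := [[1], [0]]

def Spec_coloring (graph : List (List Int)) (out : Bool) : Prop := out = coloring_alt graph
instance (graph : List (List Int)) (out : Bool) : Decidable (Spec_coloring graph out) := by unfold Spec_coloring; infer_instance

-- ===== CLAIM (what is proved, stated in full; the proofs are below) =====
def Claim_equal_coloring : Prop := ∀ (graph : List (List Int)), Dom_coloring graph → Pre_coloring graph → Spec_coloring graph (coloring graph)

-- ===== LEMMAS AND PROOFS =====

-- A's equal_set is two-sided inclusion, i.e. equality of members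
lemma equalSet_iff (l1 l2 : List Int) : equalSet l1 l2 = true ↔ (∀ x, x ∈ l1 ↔ x ∈ l2) := by
  simp only [equalSet, Bool.and_eq_true, List.all_eq_true, List.contains_iff_mem]
  constructor
  · rintro ⟨h1, h2⟩ x; exact ⟨h1 x, h2 x⟩
  · intro h; exact ⟨fun x hx => (h x).1 hx, fun x hx => (h x).2 hx⟩

-- proof-side view of A's group bookkeeping: collect the distinct neighbor sets
def addDistinct (acc : List (PySem.Set Int)) (nbrs : List Int) : List (PySem.Set Int) :=
  let s : PySem.Set Int := PySem.Set.ofList nbrs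
  if acc.any (fun t => PySem.Set.equal t s) then acc else acc ++ [s]

-- Python's set equality on set(l1), set(l2) coincides with A's equal_set(l1, l2)
lemma setEqual_ofList_eq (l1 l2 : List Int) :
    PySem.Set.equal (PySem.Set.ofList l1) (PySem.Set.ofList l2) = equalSet l1 l2 := by
  rw [Bool.eq_iff_iff, equalSet_iff]
  simp [PySem.Set.equal_iff, PySem.Set.mem_ofList]

-- the distinct-list fold never shrinks
lemma length_le_foldl_addDistinct (gs : List (Int × List Int)) :
    ∀ acc : List (PySem.Set Int),
      acc.length ≤ (gs.foldl (fun acc p => addDistinct acc p.2) acc).length := by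
  induction gs with
  | nil => intro acc; simp
  | cons p rest ih =>
      intro acc
      refine le_trans ?_ (ih (addDistinct acc p.2))
      by_cases h : (acc.any fun t => PySem.Set.equal t (PySem.Set.ofList p.2)) = true
      · simp [addDistinct, h]
      · simp [addDistinct, h]

-- one unfolding step of A's loop
lemma coloringLoop_cons (V : List Int) (i : Int) (nbrs : List Int) (rest : List (Int × List Int))
    (g1t g2t : Bool) (g1 g2 : List Int) :
    coloringLoop V ((i, nbrs) :: rest) g1t g2t g1 g2 =
      (if nbrs.contains i then false
       else if nbrs.any (fun v => !(V.contains v)) then false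
       else if !g1t then coloringLoop V rest true g2t (g1 ++ nbrs) g2
       else if equalSet g1 nbrs then coloringLoop V rest g1t g2t g1 g2
       else if !g2t then coloringLoop V rest g1t true g1 (g2 ++ nbrs)
       else if !(equalSet g2 nbrs) then false
       else coloringLoop V rest g1t g2t g1 g2) := rfl

-- main loop invariant: A's loop, started in a state whose groups represent the distinct
-- list D of the processed prefix, computes the validity/distinct-count/union form
lemma loop_eq (V : List Int) (items : List (Int × List Int)) :
    ∀ (g1t g2t : Bool) (g1 g2 : List Int) (D : List (PySem.Set Int)),
    ((g1t = false ∧ g2t = false ∧ g1 = [] ∧ g2 = [] ∧ D = []) ∨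
     (g1t = true ∧ g2t = false ∧ g2 = [] ∧ D = [PySem.Set.ofList g1]) ∨
     (g1t = true ∧ g2t = true ∧ D = [PySem.Set.ofList g1, PySem.Set.ofList g2])) →
    coloringLoop V items g1t g2t g1 g2 =
      (if items.any (fun p => p.2.contains p.1 || p.2.any (fun v => !(V.contains v))) then false
       else if ((items.foldl (fun acc p => addDistinct acc p.2) D).length > 2) then false
       else PySem.Set.equal
              ((items.foldl (fun acc p => addDistinct acc p.2) D).foldl
                (fun u s => PySem.Set.union u s) PySem.Set.empty)
              (PySem.Set.ofList V)) := by
  induction items with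
  | nil =>
      intro g1t g2t g1 g2 D h
      rcases h with ⟨h1, h2, hg1, hg2, hD⟩ | ⟨h1, h2, hg2, hD⟩ | ⟨h1, h2, hD⟩ <;> subst_vars <;>
        · simp only [coloringLoop, List.any_nil, List.foldl_nil]
          rw [if_neg (by simp), if_neg (by simp)]
          rw [Bool.eq_iff_iff, equalSet_iff, PySem.Set.equal_iff]
          constructor
          · intro h x
            have := h x
            simp only [List.mem_append, List.foldl_cons, List.foldl_nil, PySem.Set.mem_union,
              PySem.Set.mem_ofList, PySem.Set.empty, List.not_mem_nil] at this ⊢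
            tauto
          · intro h x
            have := h x
            simp only [List.mem_append, List.foldl_cons, List.foldl_nil, PySem.Set.mem_union,
              PySem.Set.mem_ofList, PySem.Set.empty, List.not_mem_nil] at this ⊢
            tauto
  | cons p rest ih =>
      intro g1t g2t g1 g2 D h
      obtain ⟨i, nbrs⟩ := p
      simp only [List.any_cons, List.foldl_cons, coloringLoop_cons]
      cases hself : nbrs.contains i with
      | true => simp
      | false =>
        cases hval : nbrs.any (fun v => !(V.contains v)) with
        | true => simp
        | false =>
          rcases h with ⟨h1, h2, hg1, hg2, hD⟩ | ⟨h1, h2, hg2, hD⟩ | ⟨h1, h2, hD⟩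
          · -- no group taken yet
            subst_vars
            rw [show addDistinct [] nbrs = [PySem.Set.ofList ([] ++ nbrs)] by simp [addDistinct]]
            rw [ih true false ([] ++ nbrs) [] [PySem.Set.ofList ([] ++ nbrs)]
                 (Or.inr (Or.inl ⟨rfl, rfl, rfl, rfl⟩))]
            simp
          · -- only group_1 taken
            subst_vars
            cases heq : equalSet g1 nbrs with
            | true =>
                rw [show addDistinct [PySem.Set.ofList g1] nbrs = [PySem.Set.ofList g1] by
                      simp [addDistinct, setEqual_ofList_eq, heq]]
                rw [ih true false g1 [] [PySem.Set.ofList g1] (Or.inr (Or.inl ⟨rfl, rfl, rfl, rfl⟩))]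
                simp
            | false =>
                rw [show addDistinct [PySem.Set.ofList g1] nbrs =
                      [PySem.Set.ofList g1, PySem.Set.ofList ([] ++ nbrs)] by
                      simp [addDistinct, setEqual_ofList_eq, heq]]
                rw [ih true true g1 ([] ++ nbrs)
                      [PySem.Set.ofList g1, PySem.Set.ofList ([] ++ nbrs)]
                      (Or.inr (Or.inr ⟨rfl, rfl, rfl⟩))]
                simp
          · -- both groups taken
            subst_vars
            cases heq1 : equalSet g1 nbrs with
            | true =>
                rw [show addDistinct [PySem.Set.ofList g1, PySem.Set.ofList g2] nbrs =
                      [PySem.Set.ofList g1, PySem.Set.ofList g2] by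
                      simp [addDistinct, setEqual_ofList_eq, heq1]]
                rw [ih true true g1 g2 [PySem.Set.ofList g1, PySem.Set.ofList g2]
                      (Or.inr (Or.inr ⟨rfl, rfl, rfl⟩))]
                simp
            | false =>
              cases heq2 : equalSet g2 nbrs with
              | true =>
                  rw [show addDistinct [PySem.Set.ofList g1, PySem.Set.ofList g2] nbrs =
                        [PySem.Set.ofList g1, PySem.Set.ofList g2] by
                        simp [addDistinct, setEqual_ofList_eq, heq1, heq2]]
                  rw [ih true true g1 g2 [PySem.Set.ofList g1, PySem.Set.ofList g2]
                        (Or.inr (Or.inr ⟨rfl, rfl, rfl⟩))]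
                  simp
              | false =>
                  -- a third distinct neighbor set: A returns False, the distinct list exceeds 2
                  rw [show addDistinct [PySem.Set.ofList g1, PySem.Set.ofList g2] nbrs =
                        [PySem.Set.ofList g1, PySem.Set.ofList g2, PySem.Set.ofList nbrs] by
                        simp [addDistinct, setEqual_ofList_eq, heq1, heq2]]
                  have h3 : 2 < (rest.foldl (fun acc p => addDistinct acc p.2)
                      [PySem.Set.ofList g1, PySem.Set.ofList g2, PySem.Set.ofList nbrs]).length := by
                    have := length_le_foldl_addDistinct rest
                      [PySem.Set.ofList g1, PySem.Set.ofList g2, PySem.Set.ofList nbrs]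
                    simp only [List.length_cons, List.length_nil] at this
                    omega
                  simp [h3]

-- A's dedup fold over enumerate(graph) equals the same fold over graph
lemma foldl_addDistinct_enumerate (graph : List (List Int)) (D : List (PySem.Set Int)) :
    (PySem.List.enumerate graph 0).foldl (fun acc p => addDistinct acc p.2) D =
      graph.foldl addDistinct D := by
  conv_rhs => rw [← PySem.List.map_snd_enumerate graph 0]
  rw [List.foldl_map]

-- sorted(set(xs)) equals a strictly increasing list iff the members agree
lemma sortedSet_eq_iff (xs ys : List Int) (hys : ys.Pairwise (· < ·)) :
    (PySem.List.sorted (PySem.Set.ofList xs) (fun x => x) = ys) ↔ (∀ v, v ∈ xs ↔ v ∈ ys) := by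
  constructor
  · intro h v
    rw [← h]
    simp [PySem.List.mem_sorted, PySem.Set.mem_ofList]
  · intro h
    apply PySem.List.sorted_eq_of_perm_of_pairwise_lt _ _ _ _ hys
    rw [List.perm_ext_iff_of_nodup (hys.imp ne_of_lt) (PySem.Set.nodup_ofList xs)]
    intro a
    rw [PySem.Set.mem_ofList]
    exact (h a).symm

-- sorted on Nodup lists is injective up to membership
lemma sorted_nodup_eq_iff (s t : List Int) (hs : s.Nodup) (ht : t.Nodup) :
    (PySem.List.sorted s (fun x => x) = PySem.List.sorted t (fun x => x)) ↔
      (∀ v, v ∈ s ↔ v ∈ t) := by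
  rw [PySem.List.sorted_id_eq_sorted_id_iff_perm, List.perm_ext_iff_of_nodup hs ht]

-- the distinct-set fold has the same length as deduplicating the canonical keys
lemma foldl_addDistinct_len (g : List (List Int)) :
    ∀ acc : List (PySem.Set Int), (∀ s ∈ acc, s.Nodup) →
      (g.foldl addDistinct acc).length =
        ((g.map canon).foldl PySem.Set.add (acc.map (fun s => PySem.List.sorted s (fun x => x)))).length := by
  induction g with
  | nil => intro acc _; simp
  | cons nbrs rest ih =>
      intro acc hacc
      simp only [List.foldl_cons, List.map_cons]
      have hmem : PySem.Set.contains (acc.map (fun s => PySem.List.sorted s (fun x => x))) (canon nbrs) =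
          acc.any (fun t => PySem.Set.equal t (PySem.Set.ofList nbrs)) := by
        rw [Bool.eq_iff_iff, PySem.Set.contains_iff]
        simp only [List.mem_map, List.any_eq_true]
        constructor
        · rintro ⟨s, hsmem, hs⟩
          refine ⟨s, hsmem, ?_⟩
          rw [PySem.Set.equal_iff]
          intro x
          unfold canon at hs
          have := (sorted_nodup_eq_iff s (PySem.Set.ofList nbrs) (hacc s hsmem)
            (PySem.Set.nodup_ofList nbrs)).1 hs x
          simpa [PySem.Set.mem_ofList] using this
        · rintro ⟨s, hsmem, hs⟩
          refine ⟨s, hsmem, ?_⟩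
          unfold canon
          rw [sorted_nodup_eq_iff s (PySem.Set.ofList nbrs) (hacc s hsmem)
            (PySem.Set.nodup_ofList nbrs)]
          intro x
          rw [PySem.Set.equal_iff] at hs
          simpa [PySem.Set.mem_ofList] using hs x
      by_cases h : (acc.any fun t => PySem.Set.equal t (PySem.Set.ofList nbrs)) = true
      · rw [show addDistinct acc nbrs = acc by simp [addDistinct, h]]
        rw [show PySem.Set.add (acc.map (fun s => PySem.List.sorted s (fun x => x))) (canon nbrs)
              = acc.map (fun s => PySem.List.sorted s (fun x => x)) by
            unfold PySem.Set.add; rw [hmem, h]; simp]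
        exact ih acc hacc
      · rw [show addDistinct acc nbrs = acc ++ [PySem.Set.ofList nbrs] by
            simp only [addDistinct, h]; simp]
        rw [show PySem.Set.add (acc.map (fun s => PySem.List.sorted s (fun x => x))) (canon nbrs)
              = acc.map (fun s => PySem.List.sorted s (fun x => x)) ++ [canon nbrs] by
            unfold PySem.Set.add; rw [hmem, eq_false_of_ne_true h]; simp]
        rw [show acc.map (fun s => PySem.List.sorted s (fun x => x)) ++ [canon nbrs]
              = (acc ++ [PySem.Set.ofList nbrs]).map (fun s => PySem.List.sorted s (fun x => x)) by
            simp [canon]]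
        apply ih
        intro s hs
        rcases List.mem_append.1 hs with h' | h'
        · exact hacc s h'
        · simp only [List.mem_singleton] at h'; subst h'; exact PySem.Set.nodup_ofList nbrs

-- membership in the folded union of a list of sets
lemma mem_foldl_union (l : List (PySem.Set Int)) (x : Int) :
    ∀ acc : PySem.Set Int,
      (x ∈ l.foldl (fun u s => PySem.Set.union u s) acc ↔ x ∈ acc ∨ ∃ s ∈ l, x ∈ s) := by
  induction l with
  | nil => intro acc; simp
  | cons s rest ih =>
      intro acc
      simp only [List.foldl_cons, ih, PySem.Set.mem_union, List.mem_cons]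
      constructor
      · rintro ((h | h) | ⟨t, ht, hx⟩)
        · exact Or.inl h
        · exact Or.inr ⟨s, Or.inl rfl, h⟩
        · exact Or.inr ⟨t, Or.inr ht, hx⟩
      · rintro (h | ⟨t, (rfl | ht), hx⟩)
        · exact Or.inl (Or.inl h)
        · exact Or.inl (Or.inr hx)
        · exact Or.inr ⟨t, ht, hx⟩

-- the members of the collected distinct sets are the members of the neighbor lists
lemma mem_foldl_addDistinct (g : List (List Int)) (x : Int) :
    ∀ acc : List (PySem.Set Int),
      ((∃ s ∈ g.foldl addDistinct acc, x ∈ s) ↔ (∃ s ∈ acc, x ∈ s) ∨ ∃ nbrs ∈ g, x ∈ nbrs) := by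
  induction g with
  | nil => intro acc; simp
  | cons nbrs rest ih =>
      intro acc
      simp only [List.foldl_cons, List.mem_cons]
      by_cases h : (acc.any fun t => PySem.Set.equal t (PySem.Set.ofList nbrs)) = true
      · rw [show addDistinct acc nbrs = acc by simp [addDistinct, h]]
        rw [ih acc]
        simp only [List.any_eq_true] at h
        obtain ⟨t, htmem, ht⟩ := h
        rw [PySem.Set.equal_iff] at ht
        constructor
        · rintro (h' | ⟨m, hm, hx⟩)
          · exact Or.inl h'
          · exact Or.inr ⟨m, Or.inr hm, hx⟩
        · rintro (h' | ⟨m, (rfl | hm), hx⟩)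
          · exact Or.inl h'
          · exact Or.inl ⟨t, htmem, (ht x).2 (by simpa [PySem.Set.mem_ofList] using hx)⟩
          · exact Or.inr ⟨m, hm, hx⟩
      · rw [show addDistinct acc nbrs = acc ++ [PySem.Set.ofList nbrs] by
            simp only [addDistinct, h]; simp]
        rw [ih (acc ++ [PySem.Set.ofList nbrs])]
        simp only [List.mem_append, List.mem_singleton]
        constructor
        · rintro (⟨s, (hs | rfl), hx⟩ | ⟨m, hm, hx⟩)
          · exact Or.inl ⟨s, hs, hx⟩
          · exact Or.inr ⟨nbrs, Or.inl rfl, by simpa [PySem.Set.mem_ofList] using hx⟩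
          · exact Or.inr ⟨m, Or.inr hm, hx⟩
        · rintro (⟨s, hs, hx⟩ | ⟨m, (rfl | hm), hx⟩)
          · exact Or.inl ⟨s, Or.inl hs, hx⟩
          · exact Or.inl ⟨PySem.Set.ofList m, Or.inr rfl, by simpa [PySem.Set.mem_ofList] using hx⟩
          · exact Or.inr ⟨m, hm, hx⟩

-- any over enumerate, as an existential over positions
lemma any_enumerate_iff {α : Type} (g : List α) (p : Int × α → Bool) :
    ∀ s : Int, ((PySem.List.enumerate g s).any p = true ↔
      ∃ j : Nat, ∃ h : j < g.length, p (s + j, g[j]) = true) := by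
  induction g with
  | nil => intro s; simp [PySem.List.enumerate]
  | cons x t ih =>
      intro s
      rw [show PySem.List.enumerate (x :: t) s = (s, x) :: PySem.List.enumerate t (s + 1) from rfl]
      simp only [List.any_cons, Bool.or_eq_true, ih (s + 1)]
      constructor
      · rintro (h | ⟨j, hj, hp⟩)
        · exact ⟨0, by simp, by simpa using h⟩
        · refine ⟨j + 1, by simpa using hj, ?_⟩
          have : s + ((j : Int) + 1) = s + 1 + (j : Int) := by ring
          push_cast
          rw [this]
          simpa using hp
      · rintro ⟨j, hj, hp⟩
        cases j with
        | zero => exact Or.inl (by simpa using hp)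
        | succ j =>
            refine Or.inr ⟨j, by simpa using hj, ?_⟩
            have : s + ((j : Int) + 1) = s + 1 + (j : Int) := by ring
            push_cast at hp ⊢
            rw [this] at hp
            simpa using hp

-- any distributes over a disjunction of tests
lemma any_or_distrib {α : Type} (l : List α) (p q : α → Bool) :
    l.any (fun x => p x || q x) = (l.any p || l.any q) := by
  induction l with
  | nil => rfl
  | cons a t ih =>
      simp only [List.any_cons, ih]
      cases p a <;> cases q a <;> simp

-- B's self-loop scan over range(n) equals A's scan over enumerate(graph)
lemma selfScan_eq (g : List (List Int)) :
    (PySem.List.pyRange 0 (g.length : Int) 1).any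
        (fun i => (PySem.List.pyGetD g i []).contains i) =
      (PySem.List.enumerate g 0).any (fun p => p.2.contains p.1) := by
  rw [Bool.eq_iff_iff, List.any_eq_true, any_enumerate_iff g _ 0]
  constructor
  · rintro ⟨i, hi, hp⟩
    rw [PySem.List.mem_pyRange_one] at hi
    refine ⟨i.toNat, by omega, ?_⟩
    rw [PySem.List.pyGetD_eq_getElem g [] hi.1 (by omega)] at hp
    simpa [Int.toNat_of_nonneg hi.1] using hp
  · rintro ⟨j, hj, hp⟩
    refine ⟨(j : Int), by rw [PySem.List.mem_pyRange_one]; omega, ?_⟩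
    rw [PySem.List.pyGetD_eq_getElem g [] (by omega) (by exact_mod_cast hj)]
    simpa using hp

-- the ≤-2-distinct-keys test equals B's all-equal-after-filter test
lemma distinct_le_two_iff (k0 : List Int) (kt : List (List Int)) :
    ((PySem.Set.ofList (k0 :: kt)).length ≤ 2) ↔
      (((k0 :: kt).filter (fun k => !(k == k0))).any
          (fun k => !(k == PySem.List.pyGetD ((k0 :: kt).filter (fun k => !(k == k0))) 0 [])) = false) := by
  have hnodup := PySem.Set.nodup_ofList (k0 :: kt)
  have hmemK : ∀ x, x ∈ PySem.Set.ofList (k0 :: kt) ↔ x ∈ (k0 :: kt) :=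
    fun x => PySem.Set.mem_ofList (k0 :: kt) x
  have hmemF : ∀ k, k ∈ (k0 :: kt).filter (fun k => !(k == k0)) ↔ (k ∈ (k0 :: kt) ∧ k ≠ k0) := by
    intro k
    rw [List.mem_filter]
    simp
  cases hF : (k0 :: kt).filter (fun k => !(k == k0)) with
  | nil =>
      simp only [List.any_nil]
      constructor
      · intro _; exact trivial
      · intro _
        have hsub : PySem.Set.ofList (k0 :: kt) ⊆ [k0] := by
          intro x hx
          rw [hmemK] at hx
          by_cases hx0 : x = k0
          · simp [hx0]
          · exfalso
            have : x ∈ (k0 :: kt).filter (fun k => !(k == k0)) := (hmemF x).2 ⟨hx, hx0⟩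
            rw [hF] at this
            exact absurd this (List.not_mem_nil)
        have := (hnodup.subperm hsub).length_le
        simpa using le_trans this (by norm_num)
  | cons r0 rt =>
      have hget : PySem.List.pyGetD (r0 :: rt) 0 [] = r0 := by
        rw [PySem.List.pyGetD_eq_getElem _ _ (by norm_num) (by simp)]
        rfl
      rw [hget]
      have hr0 : r0 ∈ (k0 :: kt) ∧ r0 ≠ k0 := by
        rw [← hmemF, hF]
        exact List.mem_cons_self
      constructor
      · intro hle
        rw [List.any_eq_false]
        rintro k hk
        have hkk : k ∈ (k0 :: kt) ∧ k ≠ k0 := by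
          rw [← hmemF, hF]
          exact hk
        simp only [Bool.not_eq_true', beq_eq_false_iff_ne, ne_eq, not_not]
        by_contra hne
        -- three pairwise distinct members k0, r0, k of the nodup dedup list
        have hsub : [k0, r0, k] ⊆ PySem.Set.ofList (k0 :: kt) := by
          intro x hx
          rw [hmemK]
          simp only [List.mem_cons, List.not_mem_nil, or_false] at hx
          rcases hx with rfl | rfl | rfl
          · exact List.mem_cons_self
          · exact hr0.1
          · exact hkk.1
        have hnd : ([k0, r0, k] : List (List Int)).Nodup := by
          refine List.nodup_cons.2 ⟨?_, List.nodup_cons.2 ⟨?_, List.nodup_singleton _⟩⟩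
          · simp only [List.mem_cons, List.not_mem_nil, or_false]
            rintro (h | h)
            · exact hr0.2 h.symm
            · exact hkk.2 h.symm
          · simp only [List.mem_singleton]
            intro h
            exact hne h.symm
        have := (hnd.subperm hsub).length_le
        simp only [List.length_cons] at this
        omega
      · intro hall
        rw [List.any_eq_false] at hall
        have hsub : PySem.Set.ofList (k0 :: kt) ⊆ [k0, r0] := by
          intro x hx
          rw [hmemK] at hx
          by_cases hx0 : x = k0
          · simp [hx0]
          · have hxF : x ∈ (k0 :: kt).filter (fun k => !(k == k0)) := (hmemF x).2 ⟨hx, hx0⟩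
            rw [hF] at hxF
            have := hall x hxF
            simp only [Bool.not_eq_true', beq_eq_false_iff_ne, ne_eq, not_not] at this
            simp [this]
        have := (hnodup.subperm hsub).length_le
        simpa using this

-- ===== VERDICT (by name: the statement is the Claim_ definition above) =====
theorem coloring_spec : Claim_equal_coloring := by
  intro graph _ hpre
  unfold Spec_coloring coloring coloring_alt
  have hne : (graph.length == 0) = false := by
    simpa [List.length_eq_zero_iff] using hpre
  rw [hne]
  simp only [Bool.false_eq_true, if_false]
  rw [PySem.List.foldl_append_singleton, List.nil_append]
  rw [loop_eq (PySem.List.pyRange 0 graph.length 1) (PySem.List.enumerate graph 0)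
        false false [] [] [] (Or.inl ⟨rfl, rfl, rfl, rfl, rfl⟩)]
  rw [foldl_addDistinct_enumerate]
  set n : Int := (graph.length : Int) with hn
  set V := PySem.List.pyRange 0 n 1 with hV
  -- name the head vertex and resolve keys[0]
  obtain ⟨g0, gt, hg⟩ : ∃ g0 gt, graph = g0 :: gt := by
    cases graph with
    | nil => exact absurd rfl hpre
    | cons a t => exact ⟨a, t, rfl⟩
  have hkeys : graph.map canon = canon g0 :: gt.map canon := by rw [hg]; rfl
  have hget0 : PySem.List.pyGetD (graph.map canon) 0 [] = canon g0 := by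
    rw [hkeys, PySem.List.pyGetD_eq_getElem _ _ (by norm_num) (by simp)]
    rfl
  rw [hget0]
  have hdist := distinct_le_two_iff (canon g0) (gt.map canon)
  rw [← hkeys] at hdist
  have hpair : V.Pairwise (· < ·) := by
    rw [hV]; exact PySem.List.pairwise_lt_pyRange_one 0 n
  -- split A's validity test into the self-loop part and the range part
  rw [show (fun (p : Int × List Int) => p.2.contains p.1 || p.2.any (fun v => !(V.contains v)))
        = (fun p => (fun (q : Int × List Int) => q.2.contains q.1) p
            || (fun (q : Int × List Int) => q.2.any (fun v => !(V.contains v))) p) from rfl,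
      any_or_distrib]
  rw [← selfScan_eq]
  cases hself : (PySem.List.pyRange 0 n 1).any
      (fun i => (PySem.List.pyGetD graph i []).contains i) with
  | true => simp
  | false =>
    simp only [Bool.false_or]
    cases hrange : (PySem.List.enumerate graph 0).any
        (fun q => q.2.any (fun v => !(V.contains v))) with
    | true =>
      -- A returns False; B also returns False (third test or the final comparison fails)
      rw [if_pos rfl]
      -- extract an out-of-range neighbor value
      rw [List.any_eq_true] at hrange
      obtain ⟨p, hpmem, hp⟩ := hrange
      rw [List.any_eq_true] at hp
      obtain ⟨v, hvmem, hv⟩ := hp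
      have hvV : v ∉ V := by simpa using hv
      have hpg : p.2 ∈ graph := by
        rw [← PySem.List.map_snd_enumerate graph 0]
        exact List.mem_map.2 ⟨p, hpmem, rfl⟩
      cases htest : (((graph.map canon).filter (fun k => !(k == canon g0))).any
          (fun k => !(k == PySem.List.pyGetD ((graph.map canon).filter (fun k => !(k == canon g0))) 0 []))) with
      | true => simp
      | false =>
        simp only [Bool.false_eq_true, if_false]
        -- the final sorted-union comparison is false
        rw [eq_comm, beq_eq_false_iff_ne]
        intro hsort
        have := (sortedSet_eq_iff graph.flatten V hpair).1 hsort v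
        exact hvV (this.1 (List.mem_flatten.2 ⟨p.2, hpg, hvmem⟩))
    | false =>
      simp only [Bool.false_eq_true, if_false]
      -- relate the distinct count to B's filter test
      have hlen : (graph.foldl addDistinct []).length =
          (PySem.Set.ofList (graph.map canon)).length := by
        rw [foldl_addDistinct_len graph [] (by intro s h; exact absurd h (List.not_mem_nil)),
            List.map_nil, PySem.Set.ofList_eq_foldl]
      cases htest : (((graph.map canon).filter (fun k => !(k == canon g0))).any
          (fun k => !(k == PySem.List.pyGetD ((graph.map canon).filter (fun k => !(k == canon g0))) 0 []))) with
      | true =>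
        -- more than two distinct keys: A's count exceeds 2 as well
        have hgt : 2 < (graph.foldl addDistinct []).length := by
          rw [hlen]
          rcases Nat.lt_or_ge 2 (PySem.Set.ofList (graph.map canon)).length with h | h
          · exact h
          · have := hdist.mp h
            rw [htest] at this
            simp at this
        rw [if_pos hgt, if_pos rfl]

      | false =>
        have hle := hdist.mpr htest
        rw [if_neg (by rw [hlen]; omega)]
        simp only [Bool.false_eq_true, if_false]
        -- final union comparison
        rw [Bool.eq_iff_iff, PySem.Set.equal_iff, beq_iff_eq,
            sortedSet_eq_iff graph.flatten V hpair]
        have hU : ∀ x, (x ∈ (graph.foldl addDistinct []).foldl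
            (fun u s => PySem.Set.union u s) PySem.Set.empty ↔ x ∈ graph.flatten) := by
          intro x
          rw [mem_foldl_union, mem_foldl_addDistinct]
          simp [PySem.Set.empty, List.mem_flatten]
        constructor
        · intro h v
          have := h v
          rw [hU v, PySem.Set.mem_ofList] at this
          exact this
        · intro h x
          rw [hU x, PySem.Set.mem_ofList]
          exact h x
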